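-- pv_equiv track=rewrite | github.com/Bandi-Lavanya/DSA-Python- | Arrays/largestSubArr_with0.py | solve_brute
-- ===== SOURCE A (Python) =====
-- def solve_brute(a):
--     maxx = 0
--     for i in range(len(a)):
--         sum = 0
--         for j in range(i, len(a)):
--             sum += a[j]
--             if sum == 0:
--                 maxx = max(maxx, j-i+1)
--     return maxx
-- ===== SOURCE B (Python) =====
-- def solve_brute(a):
--     # Prefix sums + first-occurrence hash map: O(n) instead of A's O(n^2).
--     first = {0: -1}
--     s = 0
--     best = 0
--     for i, x in enumerate(a):
--         s += x
--         j = first.get(s)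
--         if j is None:
--             first[s] = i
--         else:
--             best = max(best, i - j)
--     return best
-- ===== Notes on version B (the rewrite author's own statement) =====
-- stated objective: faster
-- what changed: Replaced the O(n^2) nested subarray-sum scan by a single pass over prefix sums with a hash map recording the first index at which each prefix sum occurs.
import Mathlib
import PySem

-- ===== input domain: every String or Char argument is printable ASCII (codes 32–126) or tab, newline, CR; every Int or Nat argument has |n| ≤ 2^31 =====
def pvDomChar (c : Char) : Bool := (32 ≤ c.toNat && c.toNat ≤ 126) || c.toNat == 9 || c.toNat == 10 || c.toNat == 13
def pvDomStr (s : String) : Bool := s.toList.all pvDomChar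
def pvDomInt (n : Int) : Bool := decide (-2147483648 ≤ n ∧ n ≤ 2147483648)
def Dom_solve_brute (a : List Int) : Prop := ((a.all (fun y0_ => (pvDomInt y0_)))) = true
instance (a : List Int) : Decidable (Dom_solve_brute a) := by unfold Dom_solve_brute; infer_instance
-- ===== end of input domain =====

-- B replaces A's O(n^2) nested subarray-sum scan by a single pass over prefix sums
-- with a dict recording the first index at which each prefix sum occurs (objective: faster).

-- ===== PORT A =====
def solve_brute (a : List Int) : Int :=
  (PySem.List.pyRange 0 (a.length : Int) 1).foldl
    (fun maxx i =>
      ((PySem.List.pyRange i (a.length : Int) 1).foldl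
        (fun (st : Int × Int) j =>
          let s := st.1 + PySem.List.pyGetD a j 0
          (s, if s = 0 then max st.2 (j - i + 1) else st.2))
        (0, maxx)).2)
    0

-- ===== PORT B =====
def solve_brute_alt (a : List Int) : Int :=
  ((PySem.List.enumerate a).foldl
    (fun (st : PySem.Dict Int Int × Int × Int) (p : Int × Int) =>
      let s := st.2.1 + p.2
      match st.1.get? s with
      | none => (st.1.insert s p.1, s, st.2.2)
      | some j => (st.1, s, max st.2.2 (p.1 - j)))
    ((PySem.Dict.empty).insert 0 (-1), 0, 0)).2.2

-- ===== PRECONDITION & SPEC =====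
def Spec_solve_brute (a : List Int) (out : Int) : Prop := out = solve_brute_alt a
instance (a : List Int) (out : Int) : Decidable (Spec_solve_brute a out) := by unfold Spec_solve_brute; infer_instance

-- ===== CLAIM (what is proved, stated in full; the proofs are below) =====
def Claim_equal_solve_brute : Prop := ∀ (a : List Int), Dom_solve_brute a → Spec_solve_brute a (solve_brute a)

-- ===== LEMMAS AND PROOFS =====

/-- prefix sum of `a`: sum of the first `k` elements (`Int` index, clamped by `toNat`). -/
def pref (a : List Int) (k : Int) : Int := (a.take k.toNat).sum

/-- one conditional-max update — the accumulator shape shared by both programs. -/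
def cstep (q : Int → Bool) (c : Int → Int) (m i : Int) : Int := if q i then max m (c i) else m

/-- A's inner loop body (over index `j`, for fixed outer index `i`). -/
def stepA (a : List Int) (i : Int) (st : Int × Int) (j : Int) : Int × Int :=
  let s := st.1 + PySem.List.pyGetD a j 0
  (s, if s = 0 then max st.2 (j - i + 1) else st.2)

/-- B's loop body, and the loop state after the whole list. -/
def bStep (st : PySem.Dict Int Int × Int × Int) (p : Int × Int) :
    PySem.Dict Int Int × Int × Int :=
  let s := st.2.1 + p.2
  match st.1.get? s with
  | none => (st.1.insert s p.1, s, st.2.2)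
  | some j => (st.1, s, max st.2.2 (p.1 - j))

def bState (a : List Int) : PySem.Dict Int Int × Int × Int :=
  (PySem.List.enumerate a).foldl bStep ((PySem.Dict.empty).insert 0 (-1), 0, 0)

lemma pref_succ (a : List Int) (j : Int) (h0 : 0 ≤ j) (h : j < (a.length : Int)) :
    pref a (j + 1) = pref a j + PySem.List.pyGetD a j 0 := by
  have ht : (j + 1).toNat = j.toNat + 1 := by omega
  have hj : j.toNat < a.length := by omega
  rw [pref, pref, ht, PySem.List.pyGetD_eq_getElem a 0 h0 h]
  exact List.sum_take_succ a j.toNat hj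

lemma pref_append (a : List Int) (x : Int) (k : Int) (hk : k ≤ (a.length : Int)) :
    pref (a ++ [x]) k = pref a k := by
  rw [pref, pref, List.take_append_of_le_length (by omega)]

lemma pref_top (a : List Int) (x : Int) :
    pref (a ++ [x]) ((a.length : Int) + 1) = pref a (a.length : Int) + x := by
  have ht : ((a.length : Int) + 1).toNat = a.length + 1 := by omega
  rw [pref, pref, ht]
  simp

lemma cstep_max (q : Int → Bool) (c : Int → Int) (m z i : Int) :
    cstep q c (max m z) i = max (cstep q c m i) z := by
  unfold cstep; split_ifs <;> [exact max_right_comm m z (c i); rfl]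

lemma foldl_cstep_max (q : Int → Bool) (c : Int → Int) (l : List Int) (m z : Int) :
    l.foldl (cstep q c) (max m z) = max (l.foldl (cstep q c) m) z := by
  induction l generalizing m with
  | nil => rfl
  | cons i t ih => simp only [List.foldl_cons, cstep_max, ih]

lemma foldl_cstep_const (q : Int → Bool) (c : Int → Int) (l : List Int) (M : Int)
    (h : ∀ x ∈ l, q x = true → c x ≤ M) : l.foldl (cstep q c) M = M := by
  induction l with
  | nil => rfl
  | cons i t ih =>
    have hstep : cstep q c M i = M := by
      unfold cstep; split_ifs with hq
      · exact max_eq_left (h i (by simp) hq)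
      · rfl
    simp only [List.foldl_cons, hstep]
    exact ih (fun x hx hq => h x (by simp [hx]) hq)

lemma foldl_cstep_find (q : Int → Bool) (c : Int → Int) (l : List Int) (m : Int)
    (hp : l.Pairwise (fun x y => c y ≤ c x)) :
    l.foldl (cstep q c) m =
      match l.find? q with
      | none => m
      | some i0 => max m (c i0) := by
  induction l generalizing m with
  | nil => rfl
  | cons i t ih =>
    rcases List.pairwise_cons.mp hp with ⟨hi, ht⟩
    by_cases hq : q i = true
    · simp only [List.foldl_cons, List.find?_cons_of_pos hq]
      have : cstep q c m i = max m (c i) := by unfold cstep; rw [if_pos hq]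
      rw [this]
      exact foldl_cstep_const q c t (max m (c i))
        (fun x hx _ => le_trans (hi x hx) (le_max_right m (c i)))
    · simp only [List.foldl_cons, List.find?_cons_of_neg (by simpa using hq)]
      have : cstep q c m i = m := by unfold cstep; rw [if_neg hq]
      rw [this]; exact ih m ht

lemma foldl_u_max (u : Int → Int → Int)
    (hu : ∀ i m z, u i (max m z) = max (u i m) z) (l : List Int) (m z : Int) :
    l.foldl (fun m i => u i m) (max m z) = max (l.foldl (fun m i => u i m) m) z := by
  induction l generalizing m with
  | nil => rfl
  | cons i t ih => simp only [List.foldl_cons, hu, ih]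

lemma foldl_u_cstep (q : Int → Bool) (c : Int → Int) (u : Int → Int → Int)
    (hu : ∀ i m z, u i (max m z) = max (u i m) z) (l : List Int) (m j : Int) :
    l.foldl (fun m i => u i m) (cstep q c m j) = cstep q c (l.foldl (fun m i => u i m) m) j := by
  unfold cstep; split_ifs
  · exact foldl_u_max u hu l m _
  · rfl

lemma foldl_swap (q : Int → Bool) (c : Int → Int) (u : Int → Int → Int)
    (hu : ∀ i m z, u i (max m z) = max (u i m) z) (l : List Int) (m0 : Int) :
    l.foldl (fun m i => cstep q c (u i m) i) m0 =
      l.foldl (cstep q c) (l.foldl (fun m i => u i m) m0) := by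
  induction l generalizing m0 with
  | nil => rfl
  | cons i t ih =>
    simp only [List.foldl_cons]
    rw [ih (cstep q c (u i m0) i), foldl_u_cstep q c u hu t (u i m0) i]

lemma find?_congr_mem {α : Type} (l : List α) (p p' : α → Bool)
    (h : ∀ x ∈ l, p x = p' x) : l.find? p = l.find? p' := by
  induction l with
  | nil => rfl
  | cons x t ih =>
    have hx := h x (by simp)
    by_cases hq : p x = true
    · rw [List.find?_cons_of_pos hq, List.find?_cons_of_pos (hx ▸ hq)]
    · rw [List.find?_cons_of_neg (by simpa using hq),
          List.find?_cons_of_neg (by rw [← hx]; simpa using hq)]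
      exact ih (fun y hy => h y (by simp [hy]))

/-- A's inner loop with the running sum eliminated: it is a conditional-max fold
    over equal prefix sums. -/
lemma inner_elim (a : List Int) (i j0 : Int) (h0 : 0 ≤ j0) (hn : j0 ≤ (a.length : Int))
    (s m : Int) (hs : s = pref a j0 - pref a i) :
    (PySem.List.pyRange j0 (a.length : Int) 1).foldl (stepA a i) (s, m) =
      (pref a (a.length : Int) - pref a i,
       (PySem.List.pyRange j0 (a.length : Int) 1).foldl
         (cstep (fun j => pref a (j + 1) == pref a i) (fun j => j - i + 1)) m) := by
  induction hk : ((a.length : Int) - j0).toNat generalizing j0 s m with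
  | zero =>
    have hle : (a.length : Int) ≤ j0 := by omega
    have hj : j0 = (a.length : Int) := le_antisymm hn hle
    rw [PySem.List.pyRange_one_eq_nil hle]
    simp [hs, hj]
  | succ k ih =>
    have hlt : j0 < (a.length : Int) := by omega
    rw [PySem.List.pyRange_one_cons hlt]
    simp only [List.foldl_cons]
    have hstep : stepA a i (s, m) j0 =
        (pref a (j0 + 1) - pref a i,
         cstep (fun j => pref a (j + 1) == pref a i) (fun j => j - i + 1) m j0) := by
      unfold stepA cstep
      simp only [hs]
      have hps : pref a j0 - pref a i + PySem.List.pyGetD a j0 0 = pref a (j0 + 1) - pref a i := by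
        rw [pref_succ a j0 h0 hlt]; ring
      rw [hps]
      have hcond : (pref a (j0 + 1) - pref a i = 0) ↔ ((pref a (j0 + 1) == pref a i) = true) := by
        rw [beq_iff_eq, sub_eq_zero]
      by_cases hc : pref a (j0 + 1) - pref a i = 0
      · rw [if_pos hc, if_pos (hcond.mp hc)]
      · rw [if_neg hc, if_neg (fun h => hc (hcond.mpr h))]
    rw [hstep]
    exact ih (j0 + 1) (by omega) (by omega) _ _ rfl (by omega)

/-- A as an outer fold of the sum-free inner folds. -/
lemma A_outer (a : List Int) :
    solve_brute a =
      (PySem.List.pyRange 0 (a.length : Int) 1).foldl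
        (fun m i =>
          (PySem.List.pyRange i (a.length : Int) 1).foldl
            (cstep (fun j => pref a (j + 1) == pref a i) (fun j => j - i + 1)) m) 0 := by
  rw [solve_brute]
  apply PySem.List.foldl_congr_mem
  intro acc i hi
  rcases (PySem.List.mem_pyRange_one).mp hi with ⟨h0, hlt⟩
  show ((PySem.List.pyRange i (a.length : Int) 1).foldl (stepA a i) (0, acc)).2 = _
  rw [inner_elim a i i h0 (le_of_lt hlt) 0 acc (by rw [sub_self])]

lemma pyGetD_append_lt (a : List Int) (x : Int) (j : Int) (h0 : 0 ≤ j) (h : j < (a.length : Int)) :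
    PySem.List.pyGetD (a ++ [x]) j 0 = PySem.List.pyGetD a j 0 := by
  rw [PySem.List.pyGetD_eq_getElem _ 0 h0 (by simp; omega),
      PySem.List.pyGetD_eq_getElem a 0 h0 h]
  exact List.getElem_append_left (by omega)

/-- Appending one element extends A's answer by the best zero-sum subarray ending
    at the new last position — located by the FIRST equal prefix sum. -/
lemma A_snoc (a : List Int) (x : Int) :
    solve_brute (a ++ [x]) =
      match (PySem.List.pyRange 0 ((a.length : Int) + 1) 1).find?
          (fun k => pref a k == pref a (a.length : Int) + x) with
      | none => solve_brute a
      | some k0 => max (solve_brute a) ((a.length : Int) - k0 + 1) := by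
  set n : Int := (a.length : Int) with hn
  have hlen : (((a ++ [x]).length : Nat) : Int) = n + 1 := by simp [hn]
  set q : Int → Bool := fun k => pref a k == pref a n + x with hq
  set c : Int → Int := fun i => n - i + 1 with hc
  set u : Int → Int → Int := fun i m =>
    (PySem.List.pyRange i n 1).foldl
      (cstep (fun j => pref a (j + 1) == pref a i) (fun j => j - i + 1)) m with hu
  have hukey : ∀ i m z, u i (max m z) = max (u i m) z := by
    intro i m z; exact foldl_cstep_max _ _ _ m z
  have hpoint : ∀ acc : Int, ∀ i ∈ PySem.List.pyRange 0 (n + 1) 1,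
      ((PySem.List.pyRange i (n + 1) 1).foldl (stepA (a ++ [x]) i) (0, acc)).2 =
        cstep q c (u i acc) i := by
    intro acc i hi
    rcases (PySem.List.mem_pyRange_one).mp hi with ⟨h0, hlt⟩
    have hile : i ≤ n := by omega
    rw [PySem.List.pyRange_one_succ_right hile, List.foldl_append]
    have hinner : (PySem.List.pyRange i n 1).foldl (stepA (a ++ [x]) i) (0, acc) =
        (PySem.List.pyRange i n 1).foldl (stepA a i) (0, acc) := by
      apply PySem.List.foldl_congr_mem
      intro st j hj
      rcases (PySem.List.mem_pyRange_one).mp hj with ⟨hj0, hjn⟩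
      unfold stepA
      rw [pyGetD_append_lt a x j (by omega) hjn]
    rw [hinner, inner_elim a i i h0 hile 0 acc (by rw [sub_self])]
    show (stepA (a ++ [x]) i (pref a n - pref a i, u i acc) n).2 = _
    unfold stepA
    have hx : PySem.List.pyGetD (a ++ [x]) n 0 = x := by
      rw [PySem.List.pyGetD_eq_getElem _ 0 (by omega) (by simp; omega)]
      have hnn : n.toNat = a.length := by omega
      simp [hnn]
    dsimp only
    rw [hx]
    have hs : pref a n - pref a i + x = pref a n + x - pref a i := by ring
    rw [hs]
    have hcond : (pref a n + x - pref a i = 0) ↔ (q i = true) := by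
      rw [hq]; simp only [beq_iff_eq]; omega
    unfold cstep
    by_cases hcc : pref a n + x - pref a i = 0
    · rw [if_pos hcc, if_pos (hcond.mp hcc)]
    · rw [if_neg hcc, if_neg (fun h => hcc (hcond.mpr h))]
  have step1 : solve_brute (a ++ [x]) =
      (PySem.List.pyRange 0 (n + 1) 1).foldl (fun m i => cstep q c (u i m) i) 0 := by
    rw [solve_brute, hlen]
    exact PySem.List.foldl_congr_mem _ _ _ _ hpoint
  rw [step1, foldl_swap q c u hukey]
  have hinner0 : (PySem.List.pyRange 0 (n + 1) 1).foldl (fun m i => u i m) 0 = solve_brute a := by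
    rw [PySem.List.pyRange_one_succ_right (by omega : (0:Int) ≤ n), List.foldl_append]
    have hun : ∀ m : Int, u n m = m := by
      intro m; rw [hu]; simp only [PySem.List.pyRange_one_eq_nil (le_refl n), List.foldl_nil]
    simp only [List.foldl_cons, List.foldl_nil, hun]
    exact (A_outer a).symm
  rw [hinner0]
  exact foldl_cstep_find q c _ (solve_brute a)
    ((PySem.List.pairwise_lt_pyRange_one 0 (n + 1)).imp (by intro x y hxy; simp [hc]; omega))

lemma alt_eq (a : List Int) : solve_brute_alt a = (bState a).2.2 := rfl

/-- Loop invariant of B: the running sum is the total prefix sum, the dict maps each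
    prefix-sum value to (its first index) - 1, and `best` is exactly A's answer. -/
theorem bInv (a : List Int) :
    (bState a).2.1 = pref a (a.length : Int) ∧
    (bState a).2.2 = solve_brute a ∧
    ∀ v : Int, (bState a).1.get? v =
      ((PySem.List.pyRange 0 ((a.length : Int) + 1) 1).find? (fun k => pref a k == v)).map
        (fun k => k - 1) := by
  induction a using List.reverseRecOn with
  | nil =>
    refine ⟨by decide, by decide, ?_⟩
    intro v
    show ((PySem.Dict.empty).insert 0 (-1) : PySem.Dict Int Int).get? v = _
    rw [PySem.Dict.get?_insert]
    have h01 : ((List.length ([] : List Int) : Int) + 1) = 0 + 1 := by simp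
    rw [h01, PySem.List.pyRange_one_cons (by omega), PySem.List.pyRange_one_eq_nil (by omega)]
    by_cases hv : v = 0
    · subst hv
      rw [if_pos rfl, List.find?_cons_of_pos (by decide)]
      rfl
    · rw [if_neg hv, List.find?_cons_of_neg (by simpa using fun h => hv h.symm), List.find?_nil]
      simp [PySem.Dict.get?_empty]
  | append_singleton a x ih =>
    obtain ⟨hs, hb, hd⟩ := ih
    set n : Int := (a.length : Int) with hn
    have hlen2 : (((a ++ [x]).length : Nat) : Int) = n + 1 := by simp [hn]
    have hstate : bState (a ++ [x]) = bStep (bState a) (n, x) := by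
      rw [bState, bState, PySem.List.enumerate_append]
      simp only [List.foldl_append]
      rw [show ((0 : Int) + (a.length : Int)) = n by omega]
      rw [PySem.List.enumerate_cons, PySem.List.enumerate_nil]
      rfl
    have hsum : (bState a).2.1 + x = pref a n + x := by rw [hs]
    have hget := hd (pref a n + x)
    rw [hstate, hlen2]
    rcases hfind : (PySem.List.pyRange 0 (n + 1) 1).find? (fun k => pref a k == pref a n + x)
        with _ | k0
    · rw [hfind] at hget
      simp only [Option.map_none] at hget
      have hred : bStep (bState a) (n, x) =
          ((bState a).1.insert (pref a n + x) n, pref a n + x, (bState a).2.2) := by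
        unfold bStep
        dsimp only
        rw [hsum, hget]
      rw [hred]
      refine ⟨(pref_top a x).symm, ?_, ?_⟩
      · rw [hb, A_snoc, hfind]
      · intro v
        show ((bState a).1.insert (pref a n + x) n).get? v = _
        rw [PySem.Dict.get?_insert]
        have h2 : (n + 1 + 1 : Int) = (n + 1) + 1 := rfl
        rw [h2, PySem.List.pyRange_one_succ_right (by omega), List.find?_append]
        have hcongr : (PySem.List.pyRange 0 (n + 1) 1).find?
              (fun k => pref (a ++ [x]) k == v) =
            (PySem.List.pyRange 0 (n + 1) 1).find? (fun k => pref a k == v) := by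
          apply find?_congr_mem
          intro k hk
          rcases (PySem.List.mem_pyRange_one).mp hk with ⟨hk0, hk1⟩
          rw [pref_append a x k (by omega)]
        rw [hcongr]
        have hptop : pref (a ++ [x]) (n + 1) = pref a n + x := pref_top a x
        have hsing : (([n + 1] : List Int)).find? (fun k => pref (a ++ [x]) k == v) =
            if pref a n + x = v then some (n + 1) else none := by
          by_cases hv : pref a n + x = v
          · rw [if_pos hv, List.find?_cons_of_pos (by simp [hptop, hv])]
          · rw [if_neg hv, List.find?_cons_of_neg (by simp [hptop, hv]), List.find?_nil]
        rw [hsing]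
        by_cases hv : v = pref a n + x
        · subst hv
          rw [if_pos rfl, hfind, if_pos rfl]
          simp
        · rw [if_neg hv, if_neg (fun h => hv h.symm), Option.or_none, hd v]
    · rw [hfind] at hget
      simp only [Option.map_some] at hget
      have hred : bStep (bState a) (n, x) =
          ((bState a).1, pref a n + x, max (bState a).2.2 (n - (k0 - 1))) := by
        unfold bStep
        dsimp only
        rw [hsum, hget]
      rw [hred]
      refine ⟨(pref_top a x).symm, ?_, ?_⟩
      · rw [hb, A_snoc, hfind]
        have he : n - (k0 - 1) = ((a.length : Int)) - k0 + 1 := by rw [hn]; ring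
        rw [he]
      · intro v
        show (bState a).1.get? v = _
        have h2 : (n + 1 + 1 : Int) = (n + 1) + 1 := rfl
        rw [h2, PySem.List.pyRange_one_succ_right (by omega), List.find?_append]
        have hcongr : (PySem.List.pyRange 0 (n + 1) 1).find?
              (fun k => pref (a ++ [x]) k == v) =
            (PySem.List.pyRange 0 (n + 1) 1).find? (fun k => pref a k == v) := by
          apply find?_congr_mem
          intro k hk
          rcases (PySem.List.mem_pyRange_one).mp hk with ⟨hk0, hk1⟩
          rw [pref_append a x k (by omega)]
        rw [hcongr]
        rcases hf2 : (PySem.List.pyRange 0 (n + 1) 1).find? (fun k => pref a k == v)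
            with _ | k1
        · have hvne : v ≠ pref a n + x := by
            intro h; rw [h] at hf2; rw [hf2] at hfind; simp at hfind
          have hptop : pref (a ++ [x]) (n + 1) = pref a n + x := pref_top a x
          have hsing : (([n + 1] : List Int)).find? (fun k => pref (a ++ [x]) k == v) = none := by
            rw [List.find?_cons_of_neg (by simp [hptop]; exact fun h => hvne h.symm),
                List.find?_nil]
          rw [hsing, hd v, hf2]
          rfl
        · rw [hd v, hf2]
          rfl

-- ===== VERDICT (by name: the statement is the Claim_ definition above) =====
theorem solve_brute_spec : Claim_equal_solve_brute := by
  intro a _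
  unfold Spec_solve_brute
  rw [alt_eq, (bInv a).2.1]
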